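-- pv_equiv track=rewrite | github.com/ynghan/Algorithm_BaekjoonAndProgrammers | 프로그래머스/0/181872. 특정 문자열로 끝나는 가장 긴 부분 문자열 찾기/특정 문자열로 끝나는 가장 긴 부분 문자열 찾기.py | solution
-- ===== SOURCE A (Python) =====
-- def solution(myString, pat):
--     answer = ''
--
--     myString1 = myString.lower()
--     pat1 = pat.lower()
--
--     idx = 0
--     for start in range(len(myString1)):
--         for end in range(start + len(pat1), len(myString1) + 1):
--             if pat1 == myString1[start:end]:
--                 idx = end
--
--     return myString[:idx]
-- ===== SOURCE B (Python) =====
-- def solution(myString, pat):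
--     s = myString.lower()
--     p = pat.lower()
--     m = len(p)
--     for start in range(len(s) - m, -1, -1):
--         if s[start:start + m] == p:
--             return myString[:start + m]
--     return ''
-- ===== Notes on version B (the rewrite author's own statement) =====
-- stated objective: faster
-- what changed: Replaced A's nested forward start/end scan (which compares the pattern against every longer slice and remembers the last match) by a backward scan from the last feasible window position that returns immediately at the first (i.e. rightmost) fixed-size window match.
-- intended difference: When pat is empty and myString is not, A returns myString[:-1] (its idx stops at len-1, an off-by-one of the nested scan), while B returns the whole myString, the longest prefix ending with the empty pattern, which is the intended value. — e.g. on solution("ab", ""): A returns "a", B returns "ab"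
import Mathlib
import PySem

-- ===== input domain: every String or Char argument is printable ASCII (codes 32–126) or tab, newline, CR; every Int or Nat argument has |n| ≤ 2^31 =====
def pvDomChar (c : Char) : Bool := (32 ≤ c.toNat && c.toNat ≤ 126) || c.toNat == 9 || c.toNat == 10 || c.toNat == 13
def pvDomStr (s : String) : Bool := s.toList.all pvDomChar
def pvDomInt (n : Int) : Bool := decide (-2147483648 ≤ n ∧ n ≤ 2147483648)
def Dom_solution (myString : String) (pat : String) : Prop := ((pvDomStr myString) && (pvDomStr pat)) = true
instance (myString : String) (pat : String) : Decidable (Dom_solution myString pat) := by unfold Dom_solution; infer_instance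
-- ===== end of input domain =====

-- B scans the window positions BACKWARD from the last feasible one and returns at the first
-- (rightmost) match, replacing A's nested forward start/end scan (objective: faster); on
-- (pat = "", myString ≠ "") B intentionally returns all of myString, see D_.

-- ===== PORT A =====
def solution (myString : String) (pat : String) : String :=
  let myString1 := PySem.Chars.lower myString.toList
  let pat1 := PySem.Chars.lower pat.toList
  let idx : Int :=
    (PySem.List.pyRange 0 myString1.length 1).foldl (fun idx start =>
      (PySem.List.pyRange (start + pat1.length) (myString1.length + 1) 1).foldl (fun idx e =>
        if pat1 = PySem.List.slice myString1 (some start) (some e) then e else idx) idx) 0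
  String.ofList (PySem.List.slice myString.toList none (some idx))

-- ===== PORT B =====
-- the for-loop over range(len(s)-m, -1, -1) with its early 'return', as a descending recursion
def solutionAltGo (ms s p : List Char) (start : Nat) : String :=
  if PySem.List.slice s (some (start : Int)) (some ((start : Int) + (p.length : Int))) = p then
    String.ofList (PySem.List.slice ms none (some ((start : Int) + (p.length : Int))))
  else
    match start with
    | 0 => ""
    | Nat.succ k => solutionAltGo ms s p k

def solution_alt (myString : String) (pat : String) : String :=
  let s := PySem.Chars.lower myString.toList
  let p := PySem.Chars.lower pat.toList
  -- range(len(s)-m, -1, -1) is empty exactly when m > len(s): then the loop body never runs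
  if p.length ≤ s.length then solutionAltGo myString.toList s p (s.length - p.length)
  else ""

-- ===== PRECONDITION & SPEC =====
-- When pat is empty and myString is not, A returns myString[:-1] (its idx stops at len-1, an
-- off-by-one of the nested scan), while B returns the whole myString — the longest prefix
-- ending with the empty pattern, which is the intended value.
def D_solution (myString : String) (pat : String) : Prop := pat = "" ∧ myString ≠ ""
instance (myString : String) (pat : String) : Decidable (D_solution myString pat) := by unfold D_solution; infer_instance
def Spec_solution (myString : String) (pat : String) (out : String) : Prop := ¬ D_solution myString pat → out = solution_alt myString pat
instance (myString : String) (pat : String) (out : String) : Decidable (Spec_solution myString pat out) := by unfold Spec_solution; infer_instance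
def pvDiffWitness_solution : String × String := ("ab", "")
def pvDiffWitnessOut_solution : String × String := ("a", "ab")

-- ===== CLAIM (what is proved, stated in full; the proofs are below) =====
def Claim_unchanged_solution : Prop := ∀ (myString : String) (pat : String), Dom_solution myString pat → Spec_solution myString pat (solution myString pat)
def Claim_changed_solution : Prop := Dom_solution (pvDiffWitness_solution.1) (pvDiffWitness_solution.2) ∧ D_solution (pvDiffWitness_solution.1) (pvDiffWitness_solution.2) ∧ solution (pvDiffWitness_solution.1) (pvDiffWitness_solution.2) = pvDiffWitnessOut_solution.1 ∧ solution_alt (pvDiffWitness_solution.1) (pvDiffWitness_solution.2) = pvDiffWitnessOut_solution.2 ∧ pvDiffWitnessOut_solution.1 ≠ pvDiffWitnessOut_solution.2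
def Claim_exact_solution : Prop := ∀ (myString : String) (pat : String), Dom_solution myString pat → D_solution myString pat → solution myString pat ≠ solution_alt myString pat

-- ===== LEMMAS AND PROOFS =====

-- The slice s[j:e] (0 ≤ j ≤ e) has length min(e-j, |s|-j); when that differs from |p| it cannot equal p.
theorem pv_slice_ne (s p : List Char) (j : Nat) (e : Int) (h0 : (j : Int) ≤ e)
    (h1 : min (e.toNat - j) (s.length - j) ≠ p.length) :
    ¬ p = PySem.List.slice s (some (j : Int)) (some e) := by
  intro h
  have hlen : p.length = (PySem.List.slice s (some (j : Int)) (some e)).length := by rw [← h]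
  rw [PySem.List.slice_toNat s (by omega) (by omega)] at hlen
  simp [List.length_take, List.length_drop] at hlen
  omega

-- A's inner loop over end updates acc exactly when the one fixed window j..j+|p| matches.
theorem pv_inner (s p : List Char) (j : Nat) (hj : j < s.length) (acc : Int) :
    (PySem.List.pyRange ((j : Int) + p.length) (s.length + 1) 1).foldl (fun idx e =>
        if p = PySem.List.slice s (some (j : Int)) (some e) then e else idx) acc
    = if PySem.List.slice s (some (j : Int)) (some ((j : Int) + p.length)) = p
      then (j : Int) + p.length else acc := by
  by_cases hle : (j : Int) + p.length ≤ s.length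
  · rw [PySem.List.pyRange_one_cons (by omega)]
    rw [List.foldl_cons]
    have hcongr := PySem.List.foldl_congr_mem
      (l := PySem.List.pyRange ((j : Int) + p.length + 1) (s.length + 1) 1)
      (init := if p = PySem.List.slice s (some (j : Int)) (some ((j : Int) + p.length))
               then (j : Int) + p.length else acc)
      (f := fun idx e => if p = PySem.List.slice s (some (j : Int)) (some e) then e else idx)
      (g := fun idx _ => idx)
      (by
        intro a e he
        have hm := (PySem.List.mem_pyRange_one).1 he
        simp only [if_neg (pv_slice_ne s p j e (by omega) (by omega))])
    rw [hcongr, PySem.List.foldl_ignore]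
    by_cases h : p = PySem.List.slice s (some (j : Int)) (some ((j : Int) + p.length))
    · rw [if_pos h, if_pos h.symm]
    · rw [if_neg h, if_neg (fun h' => h h'.symm)]
  · have hempty : PySem.List.pyRange ((j : Int) + p.length) (s.length + 1) 1 = [] := by
      simp [PySem.List.pyRange]
      omega
    rw [hempty]
    simp only [List.foldl_nil]
    have hne : ¬ PySem.List.slice s (some (j : Int)) (some ((j : Int) + p.length)) = p := by
      intro h
      exact pv_slice_ne s p j ((j : Int) + p.length) (by omega) (by omega) h.symm
    rw [if_neg hne]

-- A's outer fold, rewritten window-wise via pv_inner.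
theorem pv_A_fold (s p : List Char) :
    (PySem.List.pyRange 0 s.length 1).foldl (fun idx start =>
      (PySem.List.pyRange (start + p.length) (s.length + 1) 1).foldl (fun idx e =>
        if p = PySem.List.slice s (some start) (some e) then e else idx) idx) 0
    = (PySem.List.pyRange 0 s.length 1).foldl (fun idx start =>
        if PySem.List.slice s (some start) (some (start + p.length)) = p
        then start + p.length else idx) 0 := by
  apply PySem.List.foldl_congr_mem
  intro acc start hmem
  have hm := (PySem.List.mem_pyRange_one).1 hmem
  obtain ⟨j, rfl⟩ : ∃ j : Nat, start = (j : Int) := ⟨start.toNat, by omega⟩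
  exact pv_inner s p j (by exact_mod_cast hm.2) acc

-- Equality of A's idx fold with the fold over only the feasible window positions (nonempty pattern).
theorem pv_idx_eq (s p : List Char) (hp : p ≠ []) :
    (PySem.List.pyRange 0 s.length 1).foldl (fun idx start =>
        if PySem.List.slice s (some start) (some (start + p.length)) = p
        then start + p.length else idx) 0
    = (PySem.List.pyRange 0 (s.length - p.length + 1) 1).foldl (fun idx start =>
        if PySem.List.slice s (some start) (some (start + p.length)) = p
        then start + p.length else idx) 0 := by
  have hm1 : 1 ≤ p.length := by
    cases p with
    | nil => exact absurd rfl hp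
    | cons a t => simp
  by_cases hmn : p.length ≤ s.length
  · rw [PySem.List.pyRange_one_append 0 ((s.length : Int) - p.length + 1) s.length
        (by omega) (by omega)]
    rw [List.foldl_append]
    have hcongr := PySem.List.foldl_congr_mem
      (l := PySem.List.pyRange ((s.length : Int) - p.length + 1) s.length 1)
      (init := (PySem.List.pyRange 0 ((s.length : Int) - p.length + 1) 1).foldl
        (fun idx start =>
          if PySem.List.slice s (some start) (some (start + p.length)) = p
          then start + p.length else idx) 0)
      (f := fun idx start =>
        if PySem.List.slice s (some start) (some (start + p.length)) = p
        then start + p.length else idx)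
      (g := fun idx _ => idx)
      (by
        intro a start hst
        have hm := (PySem.List.mem_pyRange_one).1 hst
        obtain ⟨j, rfl⟩ : ∃ j : Nat, start = (j : Int) := ⟨start.toNat, by omega⟩
        have hne := pv_slice_ne s p j ((j : Int) + p.length) (by omega) (by omega)
        simp only [if_neg (fun h => hne (Eq.symm h))])
    rw [hcongr, PySem.List.foldl_ignore]
  · have hB : PySem.List.pyRange 0 ((s.length : Int) - p.length + 1) 1 = [] := by
      simp [PySem.List.pyRange]
      omega
    rw [hB]
    simp only [List.foldl_nil]
    have hcongr := PySem.List.foldl_congr_mem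
      (l := PySem.List.pyRange 0 (s.length : Int) 1)
      (init := (0 : Int))
      (f := fun idx start =>
        if PySem.List.slice s (some start) (some (start + p.length)) = p
        then start + p.length else idx)
      (g := fun idx _ => idx)
      (by
        intro a start hst
        have hm := (PySem.List.mem_pyRange_one).1 hst
        obtain ⟨j, rfl⟩ : ∃ j : Nat, start = (j : Int) := ⟨start.toNat, by omega⟩
        have hne := pv_slice_ne s p j ((j : Int) + p.length) (by omega) (by omega)
        simp only [if_neg (fun h => hne (Eq.symm h))])
    rw [hcongr, PySem.List.foldl_ignore]

-- B's backward early-return scan from position k computes the prefix up to the fold that keeps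
-- the LAST matching window among positions 0..k.
theorem pv_go_eq (ms s p : List Char) (k : Nat) :
    solutionAltGo ms s p k
    = String.ofList (PySem.List.slice ms none (some
        ((PySem.List.pyRange 0 ((k : Int) + 1) 1).foldl (fun idx start =>
          if PySem.List.slice s (some start) (some (start + p.length)) = p
          then start + p.length else idx) 0))) := by
  induction k with
  | zero =>
    rw [solutionAltGo]
    simp only [Nat.cast_zero]
    have hr : PySem.List.pyRange 0 ((0 : Int) + 1) 1 = [0] := by
      rw [PySem.List.pyRange_one_cons (by omega), PySem.List.pyRange_one_eq_nil (by omega)]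
    rw [hr]
    simp only [List.foldl_cons, List.foldl_nil]
    by_cases h : PySem.List.slice s (some (0 : Int)) (some ((0 : Int) + p.length)) = p
    · rw [if_pos h, if_pos h]
    · rw [if_neg h, if_neg h]
      rw [PySem.List.slice_to ms (by omega)]
      simp
  | succ k ih =>
    rw [solutionAltGo]
    have hsplit : PySem.List.pyRange 0 (((k + 1 : Nat) : Int) + 1) 1
        = PySem.List.pyRange 0 ((k : Int) + 1) 1 ++ [((k + 1 : Nat) : Int)] := by
      rw [PySem.List.pyRange_one_append 0 ((k : Int) + 1) (((k + 1 : Nat) : Int) + 1)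
          (by omega) (by push_cast; omega)]
      congr 1
      rw [PySem.List.pyRange_one_cons (by omega), PySem.List.pyRange_one_eq_nil (by push_cast; omega)]
      push_cast
      ring_nf
    rw [hsplit, List.foldl_append]
    simp only [List.foldl_cons, List.foldl_nil]
    by_cases h : PySem.List.slice s (some ((k + 1 : Nat) : Int)) (some (((k + 1 : Nat) : Int) + p.length)) = p
    · rw [if_pos h, if_pos h]
    · rw [if_neg h, if_neg h]
      exact ih

-- lower is a character-wise map, so it sends nonempty to nonempty.
theorem pv_lower_ne_nil (cs : List Char) (h : cs ≠ []) : PySem.Chars.lower cs ≠ [] := by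
  intro hc
  have := congrArg List.length hc
  rw [show PySem.Chars.lower cs = cs.map PySem.Chars.lowerChar from rfl] at this
  simp at this
  exact h this

-- a fold that keeps the last seen element of range(0, n) yields n-1 (n ≥ 1).
theorem pv_fold_last (n : Nat) (h : 1 ≤ n) :
    (PySem.List.pyRange 0 (n : Int) 1).foldl (fun _ start => start) (0 : Int) = (n : Int) - 1 := by
  rw [PySem.List.pyRange_one_append 0 ((n : Int) - 1) n (by omega) (by omega)]
  rw [show PySem.List.pyRange ((n : Int) - 1) (n : Int) 1 = ((n : Int) - 1) :: PySem.List.pyRange ((n : Int) - 1 + 1) (n : Int) 1 from PySem.List.pyRange_one_cons (by omega)]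
  have h2 : PySem.List.pyRange ((n : Int) - 1 + 1) (n : Int) 1 = [] := by
    simp [PySem.List.pyRange]
  rw [h2, List.foldl_append]
  simp

-- ===== VERDICT (by name: the statement is the Claim_ definition above) =====
theorem solution_spec : Claim_unchanged_solution := by
  intro myString pat _ hD
  by_cases hp : pat = ""
  · have hms : myString = "" := by
      by_contra hms
      exact hD ⟨hp, hms⟩
    subst hp; subst hms
    decide
  · have hpl : PySem.Chars.lower pat.toList ≠ [] := by
      apply pv_lower_ne_nil
      intro h
      apply hp
      have h2 := congrArg String.ofList h
      rwa [String.ofList_toList] at h2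
    unfold solution solution_alt
    simp only
    rw [pv_A_fold, pv_idx_eq _ _ hpl]
    set s := PySem.Chars.lower myString.toList with hs
    set p := PySem.Chars.lower pat.toList with hpdef
    by_cases hmn : p.length ≤ s.length
    · rw [if_pos hmn, pv_go_eq]
      congr 3
      push_cast [Nat.cast_sub hmn]
      ring_nf
    · rw [if_neg hmn]
      have hempty : PySem.List.pyRange 0 ((s.length : Int) - p.length + 1) 1 = [] := by
        simp [PySem.List.pyRange]
        omega
      rw [hempty]
      simp only [List.foldl_nil]
      rw [PySem.List.slice_to myString.toList (by omega)]
      simp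

theorem solution_changed : Claim_changed_solution := by
  unfold Claim_changed_solution
  decide

theorem solution_tight : Claim_exact_solution := by
  intro myString pat _ hD h
  obtain ⟨hp, hms⟩ := hD
  subst hp
  have hms' : myString.toList ≠ [] := by
    intro hc
    apply hms
    rw [← String.ofList_toList (s := myString), hc]
  have hn : 1 ≤ (PySem.Chars.lower myString.toList).length := by
    rw [show (PySem.Chars.lower myString.toList).length = myString.toList.length from
      List.length_map PySem.Chars.lowerChar]
    have := List.length_pos_iff.mpr hms'
    omega
  have hpempty : PySem.Chars.lower ("" : String).toList = [] := rfl
  unfold solution solution_alt at h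
  simp only [hpempty, List.length_nil, Nat.cast_zero, add_zero, Nat.sub_zero, Nat.zero_le, if_pos] at h
  -- with the empty pattern every inner window matches, so A's fold keeps the last start, n-1
  have hA : (PySem.List.pyRange 0 ((PySem.Chars.lower myString.toList).length : Int) 1).foldl
      (fun idx start =>
        (PySem.List.pyRange start (((PySem.Chars.lower myString.toList).length : Int) + 1) 1).foldl
          (fun idx e =>
            if ([] : List Char) = PySem.List.slice (PySem.Chars.lower myString.toList) (some start) (some e)
            then e else idx) idx) 0
      = ((PySem.Chars.lower myString.toList).length : Int) - 1 := by
    rw [PySem.List.foldl_congr_mem _ _ (fun _ start => start) _ (by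
      intro acc start hst
      have hm := (PySem.List.mem_pyRange_one).1 hst
      obtain ⟨j, rfl⟩ : ∃ j : Nat, start = (j : Int) := ⟨start.toNat, by omega⟩
      have hi := pv_inner (PySem.Chars.lower myString.toList) [] j (by exact_mod_cast hm.2) acc
      simp only [List.length_nil, Nat.cast_zero, add_zero] at hi
      rw [hi, PySem.List.slice_toNat _ (by omega) (by omega)]
      simp)]
    exact pv_fold_last _ hn
  -- B's backward scan matches at its very first position len(s), returning the whole string
  have hB : solutionAltGo myString.toList (PySem.Chars.lower myString.toList) []
      (PySem.Chars.lower myString.toList).length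
      = String.ofList (PySem.List.slice myString.toList none
          (some (((PySem.Chars.lower myString.toList).length : Int) + ([] : List Char).length))) := by
    rw [solutionAltGo.eq_def]
    rw [if_pos (by
      rw [PySem.List.slice_toNat _ (by omega) (by simp)]
      simp)]
  rw [hA, hB] at h
  -- so A sliced to n-1 and B to n: the two lists have different lengths
  have h2 := congrArg String.toList h
  simp only [String.toList_ofList] at h2
  have h3 := congrArg List.length h2
  rw [PySem.List.slice_to _ (by omega), PySem.List.slice_to _ (by simp)] at h3
  simp only [List.length_take] at h3
  have hlen : (PySem.Chars.lower myString.toList).length = myString.toList.length :=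
    List.length_map PySem.Chars.lowerChar
  simp only [List.length_nil, Nat.cast_zero, add_zero] at h3
  omega
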